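-- pv_equiv track=rewrite | github.com/alannadevgen/french-address-matching | standardization/tagging.py | complete_tags
-- ===== SOURCE A (Python) =====
-- def complete_tags(row_tags, tag_to_complete, index_first_tag):
--     '''
--     complete_tags: if we have PARCELLE INCONNU INCONNU PARCELLE,
--     replace INCONNU by PARCELLE
--     similarly, if we have LIBVOIE INCONNU INCONNU,
--     replace the 2 last tags by INCONNU
--     row_tags: tags of one row
--     tag_to_complete: name of the tag to complete
--     index_first_tag: index of the first token associate with tag_to_complete
--     '''
--     index_next_tag = len(row_tags)
--
--     # identify the index of the next tag if there is one
--     for index in range(index_first_tag + 1, len(row_tags)):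
--         if row_tags[index] != 'INCONNU':
--             index_next_tag = index
--             break
--
--     # complete all tags in the middle
--     # if only one tag, it will complete until the end
--     for index in range(index_first_tag + 1, index_next_tag):
--         row_tags[index] = tag_to_complete
--
--     return row_tags
-- ===== SOURCE B (Python) =====
-- def complete_tags(row_tags, tag_to_complete, index_first_tag):
--     # single forward pass: the gap is exactly the leading INCONNU run after
--     # index_first_tag, so overwrite while we see INCONNU and stop at the
--     # first real tag (or the end of the list)
--     index = index_first_tag + 1
--     while index < len(row_tags) and row_tags[index] == 'INCONNU':
--         row_tags[index] = tag_to_complete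
--         index += 1
--     return row_tags
-- ===== Notes on version B (the rewrite author's own statement) =====
-- stated objective: simpler
-- what changed: Replaces A's two sequential scans (first find the index of the next non-INCONNU tag, then a second loop rewriting the gap) by one forward while loop that overwrites the leading INCONNU run in a single pass and stops at the first real tag.
import Mathlib
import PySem

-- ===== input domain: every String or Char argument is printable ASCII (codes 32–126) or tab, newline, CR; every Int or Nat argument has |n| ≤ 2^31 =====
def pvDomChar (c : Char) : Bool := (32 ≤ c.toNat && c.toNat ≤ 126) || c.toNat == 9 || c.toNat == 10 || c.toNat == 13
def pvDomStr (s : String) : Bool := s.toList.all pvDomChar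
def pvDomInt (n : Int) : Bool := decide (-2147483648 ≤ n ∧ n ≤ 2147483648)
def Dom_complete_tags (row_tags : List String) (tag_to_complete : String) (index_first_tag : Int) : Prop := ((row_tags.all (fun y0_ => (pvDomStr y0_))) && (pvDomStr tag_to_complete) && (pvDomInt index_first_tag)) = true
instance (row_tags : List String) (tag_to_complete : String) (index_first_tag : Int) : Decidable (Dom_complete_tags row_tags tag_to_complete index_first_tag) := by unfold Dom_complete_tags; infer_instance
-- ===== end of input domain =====

-- B replaces A's two scans (find the next real tag, then rewrite the gap) by one
-- forward loop overwriting the leading INCONNU run; objective: simpler.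
-- A mutates row_tags in place and returns it; the equivalence proved here is about
-- the returned list (B performs the same in-place mutation in Python).

-- ===== PORT A =====
-- the first Python loop assigns index_next_tag and breaks at the first non-INCONNU
-- index; that is List.find? over the same range (default = len(row_tags))
def complete_tags (row_tags : List String) (tag_to_complete : String) (index_first_tag : Int) : List String :=
  let n : Int := row_tags.length
  let index_next_tag : Int :=
    match (PySem.List.pyRange (index_first_tag + 1) n 1).find?
        (fun index => PySem.List.pyGetD row_tags index "" != "INCONNU") with
    | some index => index
    | none => n
  (PySem.List.pyRange (index_first_tag + 1) index_next_tag 1).foldl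
    (fun acc index => PySem.List.pySetD acc index tag_to_complete) row_tags

-- ===== PORT B =====
def completeTagsLoop (row : List String) (tag : String) (i : Int) : List String :=
  if _h : i < (row.length : Int) then
    if PySem.List.pyGetD row i "" == "INCONNU" then
      completeTagsLoop (PySem.List.pySetD row i tag) tag (i + 1)
    else row
  else row
termination_by ((row.length : Int) - i).toNat
decreasing_by simp only [PySem.List.length_pySetD]; omega

def complete_tags_alt (row_tags : List String) (tag_to_complete : String) (index_first_tag : Int) : List String :=
  completeTagsLoop row_tags tag_to_complete (index_first_tag + 1)

-- ===== PRECONDITION & SPEC =====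
-- Pre_ excludes exactly the inputs on which the Python A raises IndexError:
-- index_first_tag + 1 < -len(row_tags) makes the very first read row_tags[index]
-- fall out of range (Python's negative indices reach back only len elements).
def Pre_complete_tags (row_tags : List String) (tag_to_complete : String) (index_first_tag : Int) : Prop :=
  -(row_tags.length : Int) ≤ index_first_tag + 1
instance (row_tags : List String) (tag_to_complete : String) (index_first_tag : Int) : Decidable (Pre_complete_tags row_tags tag_to_complete index_first_tag) := by unfold Pre_complete_tags; infer_instance
def pvWitness_complete_tags : List String × String × Int := (["LIBVOIE", "INCONNU", "INCONNU", "PARCELLE"], "LIBVOIE", 0)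

def Spec_complete_tags (row_tags : List String) (tag_to_complete : String) (index_first_tag : Int) (out : List String) : Prop := out = complete_tags_alt row_tags tag_to_complete index_first_tag
instance (row_tags : List String) (tag_to_complete : String) (index_first_tag : Int) (out : List String) : Decidable (Spec_complete_tags row_tags tag_to_complete index_first_tag out) := by unfold Spec_complete_tags; infer_instance

-- ===== CLAIM (what is proved, stated in full; the proofs are below) =====
def Claim_equal_complete_tags : Prop := ∀ (row_tags : List String) (tag_to_complete : String) (index_first_tag : Int), Dom_complete_tags row_tags tag_to_complete index_first_tag → Pre_complete_tags row_tags tag_to_complete index_first_tag → Spec_complete_tags row_tags tag_to_complete index_first_tag (complete_tags row_tags tag_to_complete index_first_tag)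

-- ===== LEMMAS AND PROOFS =====

-- Python indexing bridges (exact on the in-range indices Pre_ admits)
theorem pyGetD_nonneg' (xs : List String) (i : Int) (h1 : 0 ≤ i) (h2 : i < xs.length) (d : String) :
    PySem.List.pyGetD xs i d = xs.getD i.toNat d := by
  simp [PySem.List.pyGetD, PySem.List.pyGet?, PySem.List.pyIdx?, if_pos h1, if_pos h2, List.getD]

theorem pyGetD_neg' (xs : List String) (i : Int) (h1 : -(xs.length : Int) ≤ i) (h2 : i < 0) (d : String) :
    PySem.List.pyGetD xs i d = xs.getD ((xs.length : Int) + i).toNat d := by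
  have h : xs.length - (-i).toNat = ((xs.length : Int) + i).toNat := by omega
  simp [PySem.List.pyGetD, PySem.List.pyGet?, PySem.List.pyIdx?, if_neg (by omega : ¬ 0 ≤ i), if_pos h1, h, List.getD]

theorem pySetD_neg' (xs : List String) (i : Int) (h1 : -(xs.length : Int) ≤ i) (h2 : i < 0) (v : String) :
    PySem.List.pySetD xs i v = xs.set ((xs.length : Int) + i).toNat v := by
  have h : xs.length - (-i).toNat = ((xs.length : Int) + i).toNat := by omega
  simp [PySem.List.pySetD, PySem.List.pySet?, PySem.List.pyIdx?, if_neg (by omega : ¬ 0 ≤ i), if_pos h1, h]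

-- first index >= t whose tag is not INCONNU (= A's index_next_tag, on positions)
def firstNon (row : List String) (t : Nat) : Nat :=
  if h : t < row.length then
    if row[t] = "INCONNU" then firstNon row (t + 1) else t
  else row.length
termination_by row.length - t

theorem firstNon_le (row : List String) (t : Nat) : firstNon row t ≤ row.length := by
  rw [firstNon]; split
  · split
    · exact firstNon_le row (t+1)
    · omega
  · omega
termination_by row.length - t

theorem le_firstNon (row : List String) (t : Nat) (h : t ≤ row.length) : t ≤ firstNon row t := by
  rw [firstNon]; split
  · split
    · exact Nat.le_of_succ_le (le_firstNon row (t+1) (by omega))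
    · omega
  · omega
termination_by row.length - t

theorem firstNon_of_ge (row : List String) (t : Nat) (h : row.length ≤ t) : firstNon row t = row.length := by
  rw [firstNon]; simp [Nat.not_lt.mpr h]

theorem firstNon_succ (row : List String) (t : Nat) (h : t < row.length) (hv : row[t] = "INCONNU") :
    firstNon row t = firstNon row (t + 1) := by
  rw [firstNon, dif_pos h, if_pos hv]

theorem firstNon_stop (row : List String) (t : Nat) (h : t < row.length) (hv : ¬ row[t] = "INCONNU") :
    firstNon row t = t := by
  rw [firstNon, dif_pos h, if_neg hv]

theorem firstNon_set_lt (row : List String) (t m : Nat) (v : String) (h : m < t) :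
    firstNon (row.set m v) t = firstNon row t := by
  by_cases ht : t < row.length
  · by_cases hv : row[t] = "INCONNU"
    · rw [firstNon_succ (row.set m v) t (by simpa using ht)
        (by rw [List.getElem_set_ne (by omega)]; exact hv), firstNon_succ row t ht hv]
      exact firstNon_set_lt row (t+1) m v (by omega)
    · rw [firstNon_stop (row.set m v) t (by simpa using ht)
        (by rw [List.getElem_set_ne (by omega)]; exact hv), firstNon_stop row t ht hv]
  · rw [firstNon_of_ge _ _ (by simpa using Nat.le_of_not_lt ht),
      firstNon_of_ge _ _ (Nat.le_of_not_lt ht), List.length_set]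
termination_by row.length - t

theorem firstNon_set_gt (row : List String) (t m : Nat) (v : String) (h : firstNon row t < m) :
    firstNon (row.set m v) t = firstNon row t := by
  by_cases ht : t < row.length
  · have htm : t ≠ m := by have := le_firstNon row t (by omega); omega
    by_cases hv : row[t] = "INCONNU"
    · rw [firstNon_succ (row.set m v) t (by simpa using ht)
        (by rw [List.getElem_set_ne (by omega)]; exact hv), firstNon_succ row t ht hv]
      exact firstNon_set_gt row (t+1) m v (by rwa [firstNon_succ row t ht hv] at h)
    · rw [firstNon_stop (row.set m v) t (by simpa using ht)
        (by rw [List.getElem_set_ne (by omega)]; exact hv), firstNon_stop row t ht hv]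
  · rw [firstNon_of_ge _ _ (by simpa using Nat.le_of_not_lt ht),
      firstNon_of_ge _ _ (Nat.le_of_not_lt ht), List.length_set]
termination_by row.length - t

theorem firstNon_absorb (row : List String) (t1 t2 : Nat) (h1 : t1 ≤ t2) (h2 : t2 ≤ firstNon row t1) :
    firstNon row t1 = firstNon row t2 := by
  by_cases he : t1 = t2
  · rw [he]
  · by_cases ht : t1 < row.length
    · by_cases hv : row[t1] = "INCONNU"
      · rw [firstNon_succ row t1 ht hv]
        exact firstNon_absorb row (t1+1) t2 (by omega)
          (by rwa [firstNon_succ row t1 ht hv] at h2)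
      · rw [firstNon_stop row t1 ht hv] at h2 ⊢; omega
    · have hl := firstNon_le row t2
      rw [firstNon_of_ge _ _ (Nat.le_of_not_lt ht)]
      rw [firstNon_of_ge _ _ (by omega)]
termination_by t2 - t1

theorem firstNon_set_at (row : List String) (t m : Nat) (v : String) (h1 : t ≤ m) (h2 : m < row.length)
    (h3 : m ≤ firstNon row t) (h4 : v ≠ "INCONNU") : firstNon (row.set m v) t = m := by
  by_cases he : t = m
  · subst he
    exact firstNon_stop _ t (by simpa using h2) (by rw [List.getElem_set_self]; exact h4)
  · have ht : t < row.length := by omega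
    have hv : row[t] = "INCONNU" := by
      by_contra hv
      rw [firstNon_stop row t ht hv] at h3; omega
    rw [firstNon_succ (row.set m v) t (by simpa using ht)
      (by rw [List.getElem_set_ne (by omega)]; exact hv)]
    exact firstNon_set_at row (t+1) m v (by omega) h2
      (by rwa [firstNon_succ row t ht hv] at h3) h4
termination_by m - t

theorem set_self (row : List String) (m : Nat) (v : String) (h : m < row.length) (hv : row[m] = v) :
    row.set m v = row := by
  exact List.ext_getElem? fun i => by
    rw [List.getElem?_set]; split
    · rename_i he; subst he; rw [List.getElem?_eq_getElem (by omega), hv]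
    · rfl

theorem length_loop (row : List String) (tag : String) (i : Int) :
    (completeTagsLoop row tag i).length = row.length := by
  rw [completeTagsLoop]
  split
  · split
    · rw [length_loop, PySem.List.length_pySetD]
    · rfl
  · rfl
termination_by ((row.length : Int) - i).toNat
decreasing_by simp only [PySem.List.length_pySetD]; omega

theorem loop_nonneg (row : List String) (tag : String) (i : Int) (hi : 0 ≤ i) (p : Nat) :
    (completeTagsLoop row tag i)[p]? =
      if i.toNat ≤ p ∧ p < firstNon row i.toNat then some tag else row[p]? := by
  rw [completeTagsLoop]
  by_cases hlt : i < (row.length : Int)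
  · have hb : i.toNat < row.length := by omega
    rw [dif_pos hlt]
    have hget : PySem.List.pyGetD row i "" = row[i.toNat] := by
      rw [pyGetD_nonneg' row i hi hlt]; exact List.getD_eq_getElem row "" hb
    by_cases hv : row[i.toNat] = "INCONNU"
    · rw [if_pos (by simp [hget, hv]), PySem.List.pySetD_of_nonneg row tag hi]
      have hrec := loop_nonneg (row.set i.toNat tag) tag (i+1) (by omega) p
      have hn1 : (i+1).toNat = i.toNat + 1 := by omega
      rw [hrec, hn1, firstNon_set_lt row (i.toNat+1) i.toNat tag (by omega),
        List.getElem?_set, ← firstNon_succ row i.toNat hb hv]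
      have hF := le_firstNon row (i.toNat+1) (by omega)
      rw [firstNon_succ row i.toNat hb hv]
      split_ifs <;> first | rfl | omega
    · rw [if_neg (by simp [hget, hv]), firstNon_stop row i.toNat hb hv,
        if_neg (by omega)]
  · rw [dif_neg hlt, firstNon_of_ge row i.toNat (by omega), if_neg (by omega)]
termination_by ((row.length : Int) - i).toNat
decreasing_by simp only [List.length_set]; omega

theorem loop_neg (row : List String) (tag : String) (i : Int) (h1 : -(row.length : Int) ≤ i) (h2 : i < 0)
    (p : Nat) (hp : p < row.length) :
    (completeTagsLoop row tag i)[p]? =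
      if firstNon row ((row.length : Int) + i).toNat < row.length then
        (if ((row.length : Int) + i).toNat ≤ p ∧ p < firstNon row ((row.length : Int) + i).toNat then some tag else row[p]?)
      else
        (if ((row.length : Int) + i).toNat ≤ p ∨ p < firstNon row 0 then some tag else row[p]?) := by
  have hq : ((row.length : Int) + i).toNat < row.length := by omega
  set q : Nat := ((row.length : Int) + i).toNat with hqdef
  rw [completeTagsLoop, dif_pos (by omega : i < (row.length : Int))]
  have hget : PySem.List.pyGetD row i "" = row[q] := by
    rw [pyGetD_neg' row i h1 h2]; exact List.getD_eq_getElem row "" hq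
  by_cases hv : row[q] = "INCONNU"
  · rw [if_pos (by simp [hget, hv]), pySetD_neg' row i h1 h2, ← hqdef]
    have hFq : firstNon row q = firstNon row (q + 1) := firstNon_succ row q hq hv
    by_cases hi0 : i + 1 = 0
    · have hq1 : q = row.length - 1 := by omega
      rw [hi0, loop_nonneg (row.set q tag) tag 0 (by omega) p]
      have hFlen : firstNon row q = row.length := by
        rw [hFq, firstNon_of_ge row (q+1) (by omega)]
      rw [if_neg (show ¬ firstNon row q < row.length by omega)]
      simp only [Int.toNat_zero, Nat.zero_le, true_and]
      by_cases hF0 : firstNon row 0 < q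
      · rw [firstNon_set_gt row 0 q tag hF0, List.getElem?_set]
        split_ifs <;> first | rfl | omega
      · have habs : firstNon row 0 = firstNon row q :=
          firstNon_absorb row 0 q (by omega) (by omega)
        by_cases htag : tag = "INCONNU"
        · rw [set_self row q tag hq (htag ▸ hv), habs, hFlen]
          split_ifs <;> first | rfl | omega
        · rw [firstNon_set_at row 0 q tag (by omega) hq (by omega) htag,
            List.getElem?_set]
          split_ifs <;> first | rfl | omega
    · have hrec := loop_neg (row.set q tag) tag (i+1) (by simp only [List.length_set]; omega)
        (by omega) p (by simp only [List.length_set]; omega)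
      simp only [List.length_set] at hrec
      have hq' : ((row.length : Int) + (i+1)).toNat = q + 1 := by omega
      rw [hq', firstNon_set_lt row (q+1) q tag (by omega), ← hFq] at hrec
      rw [hrec]
      have hF1 := le_firstNon row (q+1) (by omega)
      by_cases hF : firstNon row q < row.length
      · rw [if_pos hF, if_pos hF, List.getElem?_set]
        split_ifs <;> first | rfl | omega
      · rw [if_neg hF, if_neg hF]
        by_cases hF0 : firstNon row 0 < q
        · rw [firstNon_set_gt row 0 q tag hF0, List.getElem?_set]
          split_ifs <;> first | rfl | omega
        · have habs : firstNon row 0 = firstNon row q :=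
            firstNon_absorb row 0 q (by omega) (by omega)
          have hFlen : firstNon row q = row.length := by
            have := firstNon_le row q; omega
          by_cases htag : tag = "INCONNU"
          · rw [set_self row q tag hq (htag ▸ hv), habs, hFlen]
            split_ifs <;> first | rfl | omega
          · rw [firstNon_set_at row 0 q tag (by omega) hq (by omega) htag,
              List.getElem?_set]
            split_ifs <;> first | rfl | omega
  · rw [if_neg (by simp [hget, hv]), if_pos (by rw [firstNon_stop row q hq hv]; omega),
      if_neg (by rw [firstNon_stop row q hq hv]; omega)]
termination_by (-i).toNat
decreasing_by omega

theorem pyRange_nil (a b : Int) (h : b ≤ a) : PySem.List.pyRange a b 1 = [] := by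
  rw [PySem.List.pyRange_one]
  simp [Int.toNat_of_nonpos (by omega : b - a ≤ 0)]

theorem find_nonneg (row : List String) (s : Int) (hs : 0 ≤ s) :
    (PySem.List.pyRange s (row.length : Int) 1).find?
        (fun index => PySem.List.pyGetD row index "" != "INCONNU") =
      if firstNon row s.toNat < row.length then some ((firstNon row s.toNat : Int)) else none := by
  by_cases hs2 : s < (row.length : Int)
  · have hb : s.toNat < row.length := by omega
    have hget : PySem.List.pyGetD row s "" = row[s.toNat] := by
      rw [pyGetD_nonneg' row s hs hs2]; exact List.getD_eq_getElem row "" hb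
    rw [PySem.List.pyRange_one_cons hs2]
    by_cases hv : row[s.toNat] = "INCONNU"
    · rw [List.find?_cons_of_neg (by simp [hget, hv]),
        find_nonneg row (s+1) (by omega),
        (by omega : (s+1).toNat = s.toNat + 1), ← firstNon_succ row s.toNat hb hv]
    · rw [List.find?_cons_of_pos (by simp [hget, hv]), firstNon_stop row s.toNat hb hv,
        if_pos hb, Int.toNat_of_nonneg hs]
  · rw [pyRange_nil s (row.length : Int) (by omega), List.find?_nil,
      firstNon_of_ge row s.toNat (by omega), if_neg (by omega)]
termination_by ((row.length : Int) - s).toNat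
decreasing_by omega

theorem find_neg (row : List String) (s : Int) (h1 : -(row.length : Int) ≤ s) (h2 : s < 0) :
    (PySem.List.pyRange s 0 1).find?
        (fun index => PySem.List.pyGetD row index "" != "INCONNU") =
      if firstNon row ((row.length : Int) + s).toNat < row.length then
        some ((firstNon row ((row.length : Int) + s).toNat : Int) - row.length) else none := by
  have hq : ((row.length : Int) + s).toNat < row.length := by omega
  set q : Nat := ((row.length : Int) + s).toNat with hqdef
  have hget : PySem.List.pyGetD row s "" = row[q] := by
    rw [pyGetD_neg' row s h1 h2]; exact List.getD_eq_getElem row "" hq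
  rw [PySem.List.pyRange_one_cons h2]
  by_cases hv : row[q] = "INCONNU"
  · rw [List.find?_cons_of_neg (by simp [hget, hv])]
    have hFq : firstNon row q = firstNon row (q + 1) := firstNon_succ row q hq hv
    by_cases hs0 : s + 1 = 0
    · rw [hs0, pyRange_nil 0 0 le_rfl, List.find?_nil, if_neg (by
        rw [hFq, firstNon_of_ge row (q+1) (by omega)]; omega)]
    · rw [find_neg row (s+1) (by omega) (by omega),
        (by omega : ((row.length : Int) + (s+1)).toNat = q + 1), ← hFq]
  · rw [List.find?_cons_of_pos (by simp [hget, hv]), firstNon_stop row q hq hv,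
      if_pos hq, (by omega : ((q : Nat) : Int) - row.length = s)]
termination_by (-s).toNat
decreasing_by omega

theorem length_fold (l : List Int) (tag : String) (row : List String) :
    (l.foldl (fun acc index => PySem.List.pySetD acc index tag) row).length = row.length := by
  induction l generalizing row with
  | nil => rfl
  | cons x l ih => simp [List.foldl, ih, PySem.List.length_pySetD]

theorem fold_range (a b : Int) (tag : String) (row : List String) (ha : -(row.length : Int) ≤ a)
    (hb : b ≤ (row.length : Int)) (p : Nat) (hp : p < row.length) :
    ((PySem.List.pyRange a b 1).foldl (fun acc index => PySem.List.pySetD acc index tag) row)[p]? =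
      if (a ≤ (p : Int) ∧ (p : Int) < b) ∨ (a ≤ (p : Int) - row.length ∧ (p : Int) - row.length < b)
      then some tag else row[p]? := by
  by_cases hab : a < b
  · rw [PySem.List.pyRange_one_cons hab, List.foldl_cons]
    by_cases ha0 : 0 ≤ a
    · rw [PySem.List.pySetD_of_nonneg row tag ha0]
      have hrec := fold_range (a+1) b tag (row.set a.toNat tag)
        (by simp only [List.length_set]; omega) (by simp only [List.length_set]; omega)
        p (by simp only [List.length_set]; omega)
      simp only [List.length_set] at hrec
      rw [hrec, List.getElem?_set]
      have hb2 : a.toNat < row.length := by omega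
      split_ifs <;> first | rfl | omega
    · rw [pySetD_neg' row a ha (by omega)]
      have hrec := fold_range (a+1) b tag (row.set ((row.length : Int) + a).toNat tag)
        (by simp only [List.length_set]; omega) (by simp only [List.length_set]; omega)
        p (by simp only [List.length_set]; omega)
      simp only [List.length_set] at hrec
      rw [hrec, List.getElem?_set]
      have hb2 : ((row.length : Int) + a).toNat < row.length := by omega
      split_ifs <;> first | rfl | omega
  · rw [pyRange_nil a b (by omega), List.foldl_nil, if_neg (by omega)]
termination_by (b - a).toNat
decreasing_by all_goals omega

theorem ports_agree (row : List String) (tag : String) (idx : Int)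
    (hPre : -(row.length : Int) ≤ idx + 1) :
    complete_tags row tag idx = complete_tags_alt row tag idx := by
  unfold complete_tags complete_tags_alt
  dsimp only
  apply List.ext_getElem?
  intro p
  by_cases hp : p < row.length
  · by_cases hs : 0 ≤ idx + 1
    · rw [loop_nonneg row tag (idx+1) hs p, find_nonneg row (idx+1) hs]
      have hFle := firstNon_le row (idx+1).toNat
      by_cases hF : firstNon row (idx+1).toNat < row.length
      · rw [if_pos hF]
        rw [fold_range (idx+1) (firstNon row (idx+1).toNat : Int) tag row (by omega) (by omega) p hp]
        split_ifs <;> first | rfl | omega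
      · rw [if_neg hF]
        rw [fold_range (idx+1) (row.length : Int) tag row (by omega) (by omega) p hp]
        split_ifs <;> first | rfl | omega
    · have hs2 : idx + 1 < 0 := by omega
      rw [loop_neg row tag (idx+1) hPre hs2 p hp,
        PySem.List.pyRange_one_append (idx+1) 0 (row.length : Int) (by omega) (by omega),
        List.find?_append, find_neg row (idx+1) hPre hs2]
      have hq : ((row.length : Int) + (idx+1)).toNat < row.length := by omega
      have hFle := firstNon_le row ((row.length : Int) + (idx+1)).toNat
      have hF0le := firstNon_le row 0
      by_cases hF : firstNon row ((row.length : Int) + (idx+1)).toNat < row.length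
      · rw [if_pos hF]
        simp only [Option.some_or]
        rw [if_pos hF,
          fold_range (idx+1) ((firstNon row ((row.length : Int) + (idx+1)).toNat : Int) - row.length) tag row hPre (by omega) p hp]
        split_ifs <;> first | rfl | omega
      · rw [if_neg hF]
        simp only [Option.none_or]
        rw [find_nonneg row 0 le_rfl, Int.toNat_zero, if_neg hF]
        by_cases hF0 : firstNon row 0 < row.length
        · rw [if_pos hF0,
            fold_range (idx+1) ((firstNon row 0 : Int)) tag row hPre (by omega) p hp]
          split_ifs <;> first | rfl | omega
        · rw [if_neg hF0,
            fold_range (idx+1) ((row.length : Int)) tag row hPre (by omega) p hp]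
          split_ifs <;> first | rfl | omega
  · rw [List.getElem?_eq_none (by rw [length_fold]; omega),
      List.getElem?_eq_none (by rw [length_loop]; omega)]

-- ===== VERDICT (by name: the statement is the Claim_ definition above) =====
theorem complete_tags_spec : Claim_equal_complete_tags := by
  intro row_tags tag_to_complete index_first_tag _hDom hPre
  unfold Spec_complete_tags
  exact ports_agree row_tags tag_to_complete index_first_tag hPre
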